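-- pv_equiv track=rewrite | github.com/OzSasson/my_shell | my_shell.py | split_pipe
-- ===== SOURCE A (Python) =====
-- def remove_clum(lst):
--     new_lst = []
--     for i in lst:
--         if i != '':
--             new_lst.append(i)
--     return new_lst
--
-- def split_pipe(ls):
--     s = " ".join(ls)
--     a = s.split('|')
--     t = []
--     for i in a:
--         lst1 = i.split(' ')
--         lst1 = remove_clum(lst1)
--         t.append(lst1)
--     return t
-- ===== SOURCE B (Python) =====
-- def split_pipe(ls):
--     result = []
--     current = []
--     for tok in ls:
--         segs = tok.split('|')
--         current.extend(w for w in segs[0].split(' ') if w != '')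
--         for seg in segs[1:]:
--             result.append(current)
--             current = [w for w in seg.split(' ') if w != '']
--     result.append(current)
--     return result
-- ===== Notes on version B (the rewrite author's own statement) =====
-- stated objective: alternative
-- what changed: B never builds the joined string: it makes a single pass over the original tokens, maintaining the current group and closing a group at each '|' sub-segment, instead of A's join-then-split-then-per-segment-rescan.
import Mathlib
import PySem

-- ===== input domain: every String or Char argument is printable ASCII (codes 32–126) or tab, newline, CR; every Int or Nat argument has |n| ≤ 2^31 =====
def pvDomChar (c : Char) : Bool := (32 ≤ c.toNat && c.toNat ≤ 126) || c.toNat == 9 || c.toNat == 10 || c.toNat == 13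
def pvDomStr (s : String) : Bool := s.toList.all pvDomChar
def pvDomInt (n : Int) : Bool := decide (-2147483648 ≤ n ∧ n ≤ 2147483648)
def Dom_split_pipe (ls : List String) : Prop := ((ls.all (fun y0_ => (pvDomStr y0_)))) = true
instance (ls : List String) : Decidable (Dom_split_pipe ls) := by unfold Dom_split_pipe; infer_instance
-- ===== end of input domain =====

-- B replaces A's join-then-split pipeline by a single pass over the original tokens that
-- maintains the current group and closes it at each '|' sub-segment (alternative decomposition, same cost).

-- ===== PORT A =====
-- str.split with a one-character literal (nonempty) separator is ported exactly as
-- PySem.Chars.splitOn on the character lists.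
def remove_clum (lst : List String) : List String :=
  lst.foldl (fun new_lst i => if i ≠ "" then new_lst ++ [i] else new_lst) []

def split_pipe (ls : List String) : List (List String) :=
  let s : String := PySem.Str.join " " ls
  let a : List String := (PySem.Chars.splitOn s.toList ['|']).map String.ofList
  a.foldl (fun t i =>
    t ++ [remove_clum ((PySem.Chars.splitOn i.toList [' ']).map String.ofList)]) []

-- ===== PORT B =====
-- [w for w in seg.split(' ') if w != '']
def pyWords (seg : List Char) : List String :=
  ((PySem.Chars.splitOn seg [' ']).map String.ofList).filter (fun w => w ≠ "")

def split_pipe_alt (ls : List String) : List (List String) :=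
  let fin := ls.foldl (fun st tok =>
      let segs := PySem.Chars.splitOn tok.toList ['|']
      segs.tail.foldl (fun st2 seg => (st2.1 ++ [st2.2], pyWords seg))
        (st.1, st.2 ++ pyWords segs.headI))
    (([] : List (List String)), ([] : List String))
  fin.1 ++ [fin.2]

-- ===== PRECONDITION & SPEC =====
def Spec_split_pipe (ls : List String) (out : List (List String)) : Prop := out = split_pipe_alt ls
instance (ls : List String) (out : List (List String)) : Decidable (Spec_split_pipe ls out) := by unfold Spec_split_pipe; infer_instance

-- ===== CLAIM (what is proved, stated in full; the proofs are below) =====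
def Claim_equal_split_pipe : Prop := ∀ (ls : List String), Dom_split_pipe ls → Spec_split_pipe ls (split_pipe ls)

-- ===== LEMMAS AND PROOFS =====

-- A simple structural recursion computing Python's s.split(c) for a one-character separator.
def split1 (c : Char) : List Char → List (List Char)
  | [] => [[]]
  | a :: rest => if a = c then [] :: split1 c rest else (split1 c rest).modifyHead (a :: ·)

theorem split1_ne_nil (c : Char) (l : List Char) : split1 c l ≠ [] := by
  induction l with
  | nil => simp [split1]
  | cons a rest ih =>
    simp only [split1]
    split_ifs
    · simp
    · rcases List.exists_cons_of_ne_nil ih with ⟨h, t, hht⟩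
      simp [hht]

theorem modifyHead_id' {α : Type} (l : List α) :
    l.modifyHead (fun h => h) = l := by cases l <;> simp

theorem getLastD_irrel {α : Type} (l : List α) (d1 d2 : α) (h : l ≠ []) :
    l.getLastD d1 = l.getLastD d2 := by
  have : l.getLast?.isSome := List.getLast?_isSome.mpr h
  rcases Option.isSome_iff_exists.mp this with ⟨x, hx⟩
  simp [List.getLastD_eq_getLast?, hx]

theorem getLastD_append_right {α : Type} (l m : List α) (d : α) (h : m ≠ []) :
    (l ++ m).getLastD d = m.getLastD d := by
  have : m.getLast?.isSome := List.getLast?_isSome.mpr h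
  rcases Option.isSome_iff_exists.mp this with ⟨x, hx⟩
  simp [List.getLastD_eq_getLast?, List.getLast?_append_of_ne_nil l h, hx]

theorem splitOn_go_eq (c : Char) (l : List Char) :
    ∀ (fuel : Nat) (cur : List Char) (acc : List (List Char)), l.length ≤ fuel →
      PySem.Chars.splitOn.go [c] fuel l cur acc
        = acc.reverse ++ (split1 c l).modifyHead (fun h => cur.reverse ++ h) := by
  induction l with
  | nil =>
    intro fuel cur acc _
    cases fuel <;> simp [PySem.Chars.splitOn.go, split1]
  | cons a rest ih =>
    intro fuel cur acc hf
    cases fuel with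
    | zero => simp at hf
    | succ f =>
      rw [PySem.Chars.splitOn.go]
      have hpre : [c].isPrefixOf (a :: rest) = (c == a) := by simp [List.isPrefixOf]
      by_cases hca : a = c
      · have : [c].isPrefixOf (a :: rest) = true := by simp [hca]
        simp only [this, if_pos]
        have hdrop : List.drop [c].length (a :: rest) = rest := by simp
        rw [hdrop, ih f [] (cur.reverse :: acc) (by simpa using Nat.le_of_succ_le_succ hf)]
        simp [split1, hca, modifyHead_id']
      · have : [c].isPrefixOf (a :: rest) = false := by
          simp [hpre]; exact fun h => hca h.symm
        simp only [this, Bool.false_eq_true, if_false]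
        rw [ih f (a :: cur) acc (by simpa using Nat.le_of_succ_le_succ hf)]
        have hsp : split1 c (a :: rest) = (split1 c rest).modifyHead (a :: ·) := by
          simp [split1, hca]
        rw [hsp, List.modifyHead_modifyHead]
        have hfun : (fun h => (a :: cur).reverse ++ h)
            = ((fun h => cur.reverse ++ h) ∘ fun x => a :: x) := by
          funext h; simp
        rw [hfun]

theorem splitOn_eq_split1 (c : Char) (l : List Char) :
    PySem.Chars.splitOn l [c] = split1 c l := by
  rw [PySem.Chars.splitOn]
  rw [splitOn_go_eq c l (l.length + 1) [] [] (Nat.le_succ _)]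
  simp [modifyHead_id']

theorem split1_append (c : Char) (x y : List Char) :
    split1 c (x ++ y)
      = (split1 c x).dropLast
        ++ (split1 c y).modifyHead (fun h => (split1 c x).getLastD [] ++ h) := by
  induction x with
  | nil => simp [split1, modifyHead_id']
  | cons a x' ih =>
    have hne := split1_ne_nil c x'
    by_cases hca : a = c
    · have h1 : split1 c (a :: (x' ++ y)) = [] :: split1 c (x' ++ y) := by simp [split1, hca]
      have h2 : split1 c (a :: x') = [] :: split1 c x' := by simp [split1, hca]
      rw [List.cons_append, h1, ih, h2,
        List.dropLast_cons_of_ne_nil hne, List.getLastD_cons]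
      simp
    · rcases List.exists_cons_of_ne_nil hne with ⟨h, t, hht⟩
      have h1 : split1 c (a :: (x' ++ y))
          = (split1 c (x' ++ y)).modifyHead (a :: ·) := by simp [split1, hca]
      have h2 : split1 c (a :: x') = (split1 c x').modifyHead (a :: ·) := by
        simp [split1, hca]
      rw [List.cons_append, h1, ih, h2, hht]
      cases t with
      | nil =>
        have e1 : (([h] : List (List Char))).dropLast = [] := rfl
        have e3 : List.modifyHead (fun x => a :: x) [h] = [a :: h] := rfl
        rw [e1, e3]
        have e2 : (([h] : List (List Char))).getLastD [] = h := rfl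
        have e4 : (([a :: h] : List (List Char))).dropLast = [] := rfl
        have e5 : (([a :: h] : List (List Char))).getLastD [] = a :: h := rfl
        rw [e2, e4, e5, List.nil_append, List.nil_append, List.modifyHead_modifyHead]
        have hfun : ((fun x => a :: x) ∘ fun z => h ++ z) = (fun z => (a :: h) ++ z) := by
          funext z; simp
        rw [hfun]
      | cons t1 ts =>
        simp only [List.modifyHead, List.dropLast_cons₂, List.cons_append,
          List.getLastD_cons]

-- words of a segment, as B's comprehension computes them
def wordsOf (seg : List Char) : List String :=
  ((split1 ' ' seg).map String.ofList).filter (fun w => w ≠ "")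

theorem pyWords_eq (seg : List Char) : pyWords seg = wordsOf seg := by
  simp [pyWords, wordsOf, splitOn_eq_split1]

theorem wordsOf_append (u v : List Char) : wordsOf (u ++ ' ' :: v) = wordsOf u ++ wordsOf v := by
  have hne := split1_ne_nil ' ' u
  have h1 : split1 ' ' (' ' :: v) = [] :: split1 ' ' v := by simp [split1]
  have h2 := split1_append ' ' u (' ' :: v)
  rw [h1] at h2
  have h3 : List.modifyHead (fun h => (split1 ' ' u).getLastD [] ++ h) ([] :: split1 ' ' v)
      = (split1 ' ' u).getLastD [] :: split1 ' ' v := by simp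
  rw [h3] at h2
  have h4 : (split1 ' ' u).getLastD [] = (split1 ' ' u).getLast hne := by
    rw [List.getLastD_eq_getLast?, List.getLast?_eq_getLast hne]
    rfl
  have h5 : split1 ' ' u = (split1 ' ' u).dropLast ++ [(split1 ' ' u).getLast hne] :=
    (List.dropLast_append_getLast hne).symm
  unfold wordsOf
  rw [h2, h4]
  conv_rhs => rw [h5]
  simp only [List.map_append, List.filter_append, List.map_cons, List.map_nil,
    List.filter_cons, List.filter_nil, List.append_assoc]
  split_ifs <;> simp

def groupsOf (x : List Char) : List (List String) := (split1 '|' x).map wordsOf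

def mergeG (L M : List (List String)) : List (List String) :=
  L.dropLast ++ M.modifyHead (fun h => L.getLastD [] ++ h)

theorem groupsOf_ne_nil (x : List Char) : groupsOf x ≠ [] := by
  simp [groupsOf, split1_ne_nil]

theorem wordsOf_nil : wordsOf [] = [] := by
  simp [wordsOf, split1]

theorem getLastD_map_wordsOf (l : List (List Char)) (h : l ≠ []) :
    (l.map wordsOf).getLastD [] = wordsOf (l.getLastD []) := by
  rw [List.getLastD_eq_getLast?, List.getLastD_eq_getLast?, List.getLast?_map,
    List.getLast?_eq_getLast h]
  rfl

theorem groupsOf_append (x y : List Char) :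
    groupsOf (x ++ ' ' :: y) = mergeG (groupsOf x) (groupsOf y) := by
  have hne := split1_ne_nil '|' x
  have hney := split1_ne_nil '|' y
  have h1 : split1 '|' (' ' :: y) = (split1 '|' y).modifyHead (fun z => ' ' :: z) := by
    simp [split1]
  have h2 := split1_append '|' x (' ' :: y)
  rw [h1, List.modifyHead_modifyHead] at h2
  rcases List.exists_cons_of_ne_nil hney with ⟨h, t, hht⟩
  have h3 : List.modifyHead ((fun z => (split1 '|' x).getLastD [] ++ z) ∘ fun z => ' ' :: z)
        (split1 '|' y) = ((split1 '|' x).getLastD [] ++ ' ' :: h) :: t := by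
    rw [hht]; rfl
  rw [h3] at h2
  unfold groupsOf mergeG
  rw [h2, hht]
  simp only [List.map_append, List.map_cons, wordsOf_append, List.modifyHead,
    getLastD_map_wordsOf _ hne, ← List.map_dropLast]

theorem mergeG_assoc (A B C : List (List String)) (hB : B ≠ []) :
    mergeG (mergeG A B) C = mergeG A (mergeG B C) := by
  rcases List.exists_cons_of_ne_nil hB with ⟨b, bt, rfl⟩
  cases bt with
  | nil =>
    unfold mergeG
    simp only [List.modifyHead, List.dropLast_concat, List.getLastD_concat,
      List.dropLast_singleton, List.getLastD_cons, List.getLastD_nil]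
    cases C with
    | nil => simp
    | cons c ct => simp
  | cons b1 bts =>
    unfold mergeG
    have hm : List.modifyHead (fun h => A.getLastD [] ++ h) (b :: b1 :: bts)
        = (A.getLastD [] ++ b) :: b1 :: bts := rfl
    rw [hm]
    have hd : (A.dropLast ++ ((A.getLastD [] ++ b) :: b1 :: bts)).dropLast
        = A.dropLast ++ (A.getLastD [] ++ b) :: (b1 :: bts).dropLast := by
      rw [List.dropLast_append_of_ne_nil (by simp), List.dropLast_cons₂]
    have hl : (A.dropLast ++ ((A.getLastD [] ++ b) :: b1 :: bts)).getLastD []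
        = (b1 :: bts).getLastD [] := by
      rw [getLastD_append_right _ _ _ (by simp), List.getLastD_cons,
        getLastD_irrel _ _ [] (by simp)]
    rw [hd, hl]
    cases C <;> simp [List.dropLast_cons₂, List.getLastD_cons, List.append_assoc]

theorem mergeG_nil_nil (M : List (List String)) : mergeG [[]] M = M := by
  cases M <;> simp [mergeG]

def joinChars (ls : List String) : List Char :=
  PySem.Chars.join [' '] (ls.map String.toList)

theorem split_pipe_eq_groups (ls : List String) : split_pipe ls = groupsOf (joinChars ls) := by
  simp only [split_pipe]
  have hs : (PySem.Str.join " " ls).toList = joinChars ls := by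
    rw [PySem.Str.toList_join]; rfl
  rw [hs, PySem.List.foldl_append_singleton_eq_map, List.nil_append, List.map_map,
    splitOn_eq_split1, groupsOf]
  apply List.map_congr_left
  intro seg _
  simp only [Function.comp_apply, String.toList_ofList, splitOn_eq_split1, remove_clum]
  rw [PySem.List.foldl_append_ite_eq_filter (fun i => i ≠ "")]
  rfl

theorem inner_fold_eq (t : List (List Char)) :
    ∀ (r : List (List String)) (c : List String),
      ((t.foldl (fun st2 seg => (st2.1 ++ [st2.2], pyWords seg)) (r, c)).1
        ++ [(t.foldl (fun st2 seg => (st2.1 ++ [st2.2], pyWords seg)) (r, c)).2])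
      = r ++ c :: t.map wordsOf := by
  induction t with
  | nil => intro r c; simp
  | cons seg t ih =>
    intro r c
    simp only [List.foldl_cons, List.map_cons]
    rw [ih (r ++ [c]) (pyWords seg), pyWords_eq]
    simp

theorem step_eq (res : List (List String)) (cur : List String) (x : List Char) :
    (((split1 '|' x).tail.foldl (fun st2 seg => (st2.1 ++ [st2.2], pyWords seg))
        (res, cur ++ pyWords (split1 '|' x).headI)).1
      ++ [((split1 '|' x).tail.foldl (fun st2 seg => (st2.1 ++ [st2.2], pyWords seg))
        (res, cur ++ pyWords (split1 '|' x).headI)).2])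
      = mergeG (res ++ [cur]) (groupsOf x) := by
  rcases List.exists_cons_of_ne_nil (split1_ne_nil '|' x) with ⟨h, t, hht⟩
  rw [hht]
  simp only [List.tail_cons, List.headI]
  rw [inner_fold_eq t res (cur ++ pyWords h), pyWords_eq]
  unfold mergeG groupsOf
  rw [hht]
  simp [List.dropLast_concat]

theorem fold_alt_eq (ls : List String) :
    ∀ (res : List (List String)) (cur : List String),
      ((List.foldl (fun st tok =>
          List.foldl (fun st2 seg => (st2.1 ++ [st2.2], pyWords seg))
            (st.1, st.2 ++ pyWords (split1 '|' tok.toList).headI)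
            (split1 '|' tok.toList).tail) (res, cur) ls).1
        ++ [(List.foldl (fun st tok =>
          List.foldl (fun st2 seg => (st2.1 ++ [st2.2], pyWords seg))
            (st.1, st.2 ++ pyWords (split1 '|' tok.toList).headI)
            (split1 '|' tok.toList).tail) (res, cur) ls).2])
      = mergeG (res ++ [cur]) (groupsOf (joinChars ls)) := by
  induction ls with
  | nil =>
    intro res cur
    have hj : joinChars ([] : List String) = [] := by
      simp [joinChars, PySem.Chars.join_nil]
    rw [hj]
    have hg : groupsOf [] = [[]] := by
      simp [groupsOf, split1, wordsOf_nil]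
    simp [hg, mergeG]
  | cons tok rest ih =>
    intro res cur
    simp only [List.foldl_cons]
    set p := (split1 '|' tok.toList).tail.foldl
        (fun st2 seg => (st2.1 ++ [st2.2], pyWords seg))
        (res, cur ++ pyWords (split1 '|' tok.toList).headI) with hp
    have hpe : p = (p.1, p.2) := rfl
    have hstep := step_eq res cur tok.toList
    rw [← hp] at hstep
    cases rest with
    | nil =>
      have hj : joinChars [tok] = tok.toList := by
        simp [joinChars, PySem.Chars.join_singleton]
      simp only [List.foldl_nil, hj]
      exact hstep
    | cons r rs =>
      have hj : joinChars (tok :: r :: rs) = tok.toList ++ ' ' :: joinChars (r :: rs) := by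
        simp only [joinChars, List.map_cons]
        rw [PySem.Chars.join_cons_cons]
        simp
      rw [hpe, ih p.1 p.2, hj, groupsOf_append,
        ← mergeG_assoc _ _ _ (groupsOf_ne_nil tok.toList), ← hstep]

theorem split_pipe_alt_eq_groups (ls : List String) :
    split_pipe_alt ls = groupsOf (joinChars ls) := by
  simp only [split_pipe_alt, splitOn_eq_split1]
  rw [fold_alt_eq ls [] []]
  simp only [List.nil_append]
  exact mergeG_nil_nil _

-- ===== VERDICT (by name: the statement is the Claim_ definition above) =====
theorem split_pipe_spec : Claim_equal_split_pipe := by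
  intro ls _
  show split_pipe ls = split_pipe_alt ls
  rw [split_pipe_eq_groups, split_pipe_alt_eq_groups]
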